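-- pv_equiv track=rewrite | github.com/saneome2/CU_2 | main.py | generate_svg_tree
-- ===== SOURCE A (Python) =====
-- def generate_svg_tree(graph, root):
--     positions = {}
--     def assign_positions(node, x, y):
--         if node in positions:
--             return
--         positions[node] = (x, y)
--         deps = graph.get(node, [])
--         width = max(100, len(deps) * 120)
--         start_x = x - width // 2 + 60
--         for i, dep in enumerate(deps):
--             assign_positions(dep, start_x + i * 120, y + 100)
--
--     assign_positions(root, 400, 50)
--
--     svg = '<?xml version="1.0" encoding="UTF-8"?>\n<svg width="800" height="600" xmlns="http://www.w3.org/2000/svg">\n'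
--     # Draw edges
--     for node in graph:
--         if node in positions:
--             x1, y1 = positions[node]
--             for dep in graph[node]:
--                 if dep in positions:
--                     x2, y2 = positions[dep]
--                     svg += f'  <line x1="{x1+50}" y1="{y1+50}" x2="{x2+50}" y2="{y2}" stroke="black" stroke-width="2" />\n'
--     # Draw nodes
--     for node, (x, y) in positions.items():
--         svg += f'  <rect x="{x}" y="{y}" width="100" height="50" fill="lightblue" stroke="black" stroke-width="2" rx="5" />\n'
--         svg += f'  <text x="{x+50}" y="{y+30}" text-anchor="middle" font-family="Arial" font-size="12">{node}</text>\n'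
--     svg += '</svg>\n'
--     return svg
-- ===== SOURCE B (Python) =====
-- def _attrs(attrs):
--     return ''.join(f' {k}="{v}"' for k, v in attrs)
--
-- def _tag(name, attrs):
--     return f'  <{name}{_attrs(attrs)} />\n'
--
-- def _tag_body(name, attrs, body):
--     return f'  <{name}{_attrs(attrs)}>{body}</{name}>\n'
--
-- def generate_svg_tree(graph, root):
--     # Iterative DFS over an explicit stack, recording visit order in a list and
--     # visited nodes in a set; SVG text is assembled from attribute lists and
--     # joined once instead of repeated '+=' concatenation.
--     order = []
--     seen = set()
--     stack = [(root, 400, 50)]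
--     while stack:
--         node, x, y = stack.pop()
--         if node in seen:
--             continue
--         seen.add(node)
--         order.append((node, x, y))
--         deps = graph.get(node, [])
--         sx = x - max(100, len(deps) * 120) // 2 + 60
--         for i, d in reversed(list(enumerate(deps))):
--             stack.append((d, sx + i * 120, y + 100))
--     pos = {n: (x, y) for n, x, y in order}
--     parts = ['<?xml version="1.0" encoding="UTF-8"?>\n<svg width="800" height="600" xmlns="http://www.w3.org/2000/svg">\n']
--     for node, deps in graph.items():
--         if node in pos:
--             x1, y1 = pos[node]
--             parts.extend(
--                 _tag('line', [('x1', str(x1 + 50)), ('y1', str(y1 + 50)),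
--                               ('x2', str(pos[d][0] + 50)), ('y2', str(pos[d][1])),
--                               ('stroke', 'black'), ('stroke-width', '2')])
--                 for d in deps if d in pos)
--     for node, x, y in order:
--         parts.append(_tag('rect', [('x', str(x)), ('y', str(y)), ('width', '100'),
--                                    ('height', '50'), ('fill', 'lightblue'),
--                                    ('stroke', 'black'), ('stroke-width', '2'), ('rx', '5')]))
--         parts.append(_tag_body('text', [('x', str(x + 50)), ('y', str(y + 30)),
--                                         ('text-anchor', 'middle'), ('font-family', 'Arial'),
--                                         ('font-size', '12')], node))
--     parts.append('</svg>\n')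
--     return ''.join(parts)
-- ===== Notes on version B (the rewrite author's own statement) =====
-- stated objective: alternative
-- what changed: A's recursive dict-threading assign_positions becomes an explicit-stack DFS that records the visit order in a plain list with a separate visited set (the lookup dict is built from that list afterwards), and the string '+=' loops become an attribute-list tag builder whose parts are joined once.
import Mathlib
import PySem

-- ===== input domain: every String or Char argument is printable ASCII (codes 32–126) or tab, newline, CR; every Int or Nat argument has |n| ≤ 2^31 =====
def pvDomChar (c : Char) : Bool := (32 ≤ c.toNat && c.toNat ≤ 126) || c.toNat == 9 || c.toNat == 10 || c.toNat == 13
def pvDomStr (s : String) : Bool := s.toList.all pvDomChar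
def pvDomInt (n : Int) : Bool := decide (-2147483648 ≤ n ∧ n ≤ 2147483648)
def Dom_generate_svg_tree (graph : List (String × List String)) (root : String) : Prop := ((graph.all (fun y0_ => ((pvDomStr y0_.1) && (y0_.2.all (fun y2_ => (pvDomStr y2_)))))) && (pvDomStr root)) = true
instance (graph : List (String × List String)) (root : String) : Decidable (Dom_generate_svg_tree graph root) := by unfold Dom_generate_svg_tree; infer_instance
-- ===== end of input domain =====

-- B replaces A's recursive, dict-threading position assignment by an explicit-stack DFS that
-- records the visit order in a plain list (with a separate visited set), builds the lookup dict
-- from that list afterwards, and assembles the SVG text from attribute lists joined once instead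
-- of repeated '+=' concatenation (same return value; no side effects).

-- ===== PORT A =====
-- the f-string bodies of A, as literal chunk concatenations
def pvSvgHeader : String := "<?xml version=\"1.0\" encoding=\"UTF-8\"?>\n<svg width=\"800\" height=\"600\" xmlns=\"http://www.w3.org/2000/svg\">\n"

def pvSvgLine (x1 y1 x2 y2 : Int) : String :=
  "  <line x1=\"" ++ PySem.Int.toStr (x1 + 50) ++ "\" y1=\"" ++ PySem.Int.toStr (y1 + 50) ++
  "\" x2=\"" ++ PySem.Int.toStr (x2 + 50) ++ "\" y2=\"" ++ PySem.Int.toStr y2 ++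
  "\" stroke=\"black\" stroke-width=\"2\" />\n"

def pvSvgRect (x y : Int) : String :=
  "  <rect x=\"" ++ PySem.Int.toStr x ++ "\" y=\"" ++ PySem.Int.toStr y ++
  "\" width=\"100\" height=\"50\" fill=\"lightblue\" stroke=\"black\" stroke-width=\"2\" rx=\"5\" />\n"

def pvSvgText (node : String) (x y : Int) : String :=
  "  <text x=\"" ++ PySem.Int.toStr (x + 50) ++ "\" y=\"" ++ PySem.Int.toStr (y + 30) ++
  "\" text-anchor=\"middle\" font-family=\"Arial\" font-size=\"12\">" ++ node ++ "</text>\n"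

-- A's recursive assign_positions; the fuel argument only makes the recursion structural
-- (it is chosen large enough below and never runs out — proved by the fuel lemmas).
def assignA (g : PySem.Dict String (List String)) : Nat → PySem.Dict String (Int × Int) → String → Int → Int → PySem.Dict String (Int × Int)
  | 0, ps, _, _, _ => ps
  | fuel + 1, ps, node, x, y =>
    if ps.contains node then ps
    else
      let ps1 := ps.insert node (x, y)
      let deps := (g.get? node).getD []
      let width : Int := max 100 ((deps.length : Int) * 120)
      let start_x : Int := x - PySem.Int.floordiv width 2 + 60
      (PySem.List.enumerate deps).foldl
        (fun acc p => assignA g fuel acc p.2 (start_x + p.1 * 120) (y + 100)) ps1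

def generate_svg_tree (graph : List (String × List String)) (root : String) : String :=
  let g := PySem.Dict.ofList graph          -- the Python argument is a dict
  let positions := assignA g (g.size + 2) PySem.Dict.empty root 400 50
  let svg0 := pvSvgHeader
  -- draw edges: for node in graph: if node in positions: for dep in graph[node]: if dep in positions: svg += line
  let svg1 := g.items.foldl (fun svg p =>
      match positions.get? p.1 with
      | some q =>
          p.2.foldl (fun svg dep =>
            match positions.get? dep with
            | some r => svg ++ pvSvgLine q.1 q.2 r.1 r.2
            | none => svg) svg
      | none => svg) svg0
  -- draw nodes: for node, (x, y) in positions.items(): svg += rect; svg += text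
  let svg2 := positions.items.foldl
      (fun svg p => (svg ++ pvSvgRect p.2.1 p.2.2) ++ pvSvgText p.1 p.2.1 p.2.2) svg1
  svg2 ++ "</svg>\n"

-- ===== PORT B =====
-- Source B's generic element builders: an attribute list rendered with ''.join, then the tag shell
def pvAttrs (attrs : List (String × String)) : String :=
  PySem.Str.join "" (attrs.map (fun p => " " ++ p.1 ++ "=\"" ++ p.2 ++ "\""))

def pvTag (name : String) (attrs : List (String × String)) : String :=
  "  <" ++ name ++ pvAttrs attrs ++ " />\n"

def pvTagBody (name : String) (attrs : List (String × String)) (body : String) : String :=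
  "  <" ++ name ++ pvAttrs attrs ++ ">" ++ body ++ "</" ++ name ++ ">\n"

-- Source B's while loop: the Lean list's head is the Python stack's TOP (the element stack.pop()
-- removes), so pushing the enumerated deps in reversed order is prepending them in order;
-- 'order' accumulates the visit order, 'seen' is the visited set.  Fuel only makes the loop
-- structural; it is chosen large enough below.
def loopB (g : PySem.Dict String (List String)) :
    Nat → PySem.Set String → List (String × Int × Int) → List (String × Int × Int) → List (String × Int × Int)
  | 0, _, order, _ => order
  | _ + 1, _, order, [] => order
  | fuel + 1, seen, order, (node, x, y) :: rest =>
    if PySem.Set.contains seen node then loopB g fuel seen order rest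
    else
      let deps := (g.get? node).getD []
      let sx : Int := x - PySem.Int.floordiv (max 100 ((deps.length : Int) * 120)) 2 + 60
      loopB g fuel (PySem.Set.add seen node) (order ++ [(node, x, y)])
        ((PySem.List.enumerate deps).map (fun p => (p.2, sx + p.1 * 120, y + 100)) ++ rest)

def generate_svg_tree_alt (graph : List (String × List String)) (root : String) : String :=
  let g := PySem.Dict.ofList graph
  let order := loopB g (1 + g.size + (g.values.map List.length).sum) PySem.Set.empty [] [(root, 400, 50)]
  let pos : PySem.Dict String (Int × Int) := PySem.Dict.ofList (order.map (fun t => (t.1, t.2)))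
  let edges := g.items.flatMap (fun p =>
      match pos.get? p.1 with
      | some q => p.2.filterMap (fun d => (pos.get? d).map (fun r =>
          pvTag "line" [("x1", PySem.Int.toStr (q.1 + 50)), ("y1", PySem.Int.toStr (q.2 + 50)),
            ("x2", PySem.Int.toStr (r.1 + 50)), ("y2", PySem.Int.toStr r.2),
            ("stroke", "black"), ("stroke-width", "2")]))
      | none => [])
  let nodes := order.flatMap (fun t =>
      [pvTag "rect" [("x", PySem.Int.toStr t.2.1), ("y", PySem.Int.toStr t.2.2), ("width", "100"),
         ("height", "50"), ("fill", "lightblue"), ("stroke", "black"), ("stroke-width", "2"), ("rx", "5")],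
       pvTagBody "text" [("x", PySem.Int.toStr (t.2.1 + 50)), ("y", PySem.Int.toStr (t.2.2 + 30)),
         ("text-anchor", "middle"), ("font-family", "Arial"), ("font-size", "12")] t.1])
  PySem.Str.join ""
    (["<?xml version=\"1.0\" encoding=\"UTF-8\"?>\n<svg width=\"800\" height=\"600\" xmlns=\"http://www.w3.org/2000/svg\">\n"]
      ++ edges ++ nodes ++ ["</svg>\n"])

-- ===== PRECONDITION & SPEC =====
def Spec_generate_svg_tree (graph : List (String × List String)) (root : String) (out : String) : Prop := out = generate_svg_tree_alt graph root
instance (graph : List (String × List String)) (root : String) (out : String) : Decidable (Spec_generate_svg_tree graph root out) := by unfold Spec_generate_svg_tree; infer_instance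

-- ===== CLAIM (what is proved, stated in full; the proofs are below) =====
def Claim_equal_generate_svg_tree : Prop := ∀ (graph : List (String × List String)) (root : String), Dom_generate_svg_tree graph root → Spec_generate_svg_tree graph root (generate_svg_tree graph root)

-- ===== LEMMAS AND PROOFS =====

-- B's tag builders produce exactly A's f-string texts
lemma pvTag_line (a b c d : Int) :
    pvTag "line" [("x1", PySem.Int.toStr (a + 50)), ("y1", PySem.Int.toStr (b + 50)),
      ("x2", PySem.Int.toStr (c + 50)), ("y2", PySem.Int.toStr d),
      ("stroke", "black"), ("stroke-width", "2")] = pvSvgLine a b c d := by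
  apply String.toList_inj.mp
  simp [pvTag, pvAttrs, pvSvgLine, String.toList_append, PySem.Str.join, PySem.Chars.join,
    List.intercalate, List.intersperse, List.append_assoc]

lemma pvTag_rect (x y : Int) :
    pvTag "rect" [("x", PySem.Int.toStr x), ("y", PySem.Int.toStr y), ("width", "100"),
      ("height", "50"), ("fill", "lightblue"), ("stroke", "black"), ("stroke-width", "2"), ("rx", "5")]
      = pvSvgRect x y := by
  apply String.toList_inj.mp
  simp [pvTag, pvAttrs, pvSvgRect, String.toList_append, PySem.Str.join, PySem.Chars.join,
    List.intercalate, List.intersperse, List.append_assoc]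

lemma pvTagBody_text (n : String) (x y : Int) :
    pvTagBody "text" [("x", PySem.Int.toStr (x + 50)), ("y", PySem.Int.toStr (y + 30)),
      ("text-anchor", "middle"), ("font-family", "Arial"), ("font-size", "12")] n
      = pvSvgText n x y := by
  apply String.toList_inj.mp
  simp [pvTagBody, pvAttrs, pvSvgText, String.toList_append, PySem.Str.join, PySem.Chars.join,
    List.intercalate, List.intersperse, List.append_assoc]

-- items an unvisited node pushes / recurses on, in first-child-first order
def itemsOf (x y : Int) (deps : List String) : List (String × Int × Int) :=
  (PySem.List.enumerate deps).map
    (fun p => (p.2, (x - PySem.Int.floordiv (max 100 ((deps.length : Int) * 120)) 2 + 60) + p.1 * 120, y + 100))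

def runA (g : PySem.Dict String (List String)) (fuel : Nat)
    (ps : PySem.Dict String (Int × Int)) (l : List (String × Int × Int)) : PySem.Dict String (Int × Int) :=
  l.foldl (fun acc it => assignA g fuel acc it.1 it.2.1 it.2.2) ps

-- unfolding equations in itemsOf/runA form
lemma assignA_succ (g : PySem.Dict String (List String)) (f : Nat) (ps : PySem.Dict String (Int × Int)) (n : String) (x y : Int) :
    assignA g (f + 1) ps n x y =
      if ps.contains n then ps
      else runA g f (ps.insert n (x, y)) (itemsOf x y ((g.get? n).getD [])) := by
  simp only [assignA, runA, itemsOf, List.foldl_map]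

lemma loopB_nil (g : PySem.Dict String (List String)) (f : Nat) (seen : PySem.Set String) (order : List (String × Int × Int)) :
    loopB g f seen order [] = order := by cases f <;> rfl

lemma loopB_cons (g : PySem.Dict String (List String)) (f : Nat) (seen : PySem.Set String) (order : List (String × Int × Int)) (n : String) (x y : Int) (rest : List (String × Int × Int)) :
    loopB g (f + 1) seen order ((n, x, y) :: rest) =
      if PySem.Set.contains seen n then loopB g f seen order rest
      else loopB g f (PySem.Set.add seen n) (order ++ [(n, x, y)])
        (itemsOf x y ((g.get? n).getD []) ++ rest) := by
  simp only [loopB, itemsOf]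

lemma runA_nil (g : PySem.Dict String (List String)) (f : Nat) (ps : PySem.Dict String (Int × Int)) :
    runA g f ps [] = ps := rfl

lemma runA_cons (g : PySem.Dict String (List String)) (f : Nat) (ps : PySem.Dict String (Int × Int)) (it : String × Int × Int) (l : List (String × Int × Int)) :
    runA g f ps (it :: l) = runA g f (assignA g f ps it.1 it.2.1 it.2.2) l := rfl

lemma runA_append (g : PySem.Dict String (List String)) (f : Nat) (ps : PySem.Dict String (Int × Int)) (l1 l2 : List (String × Int × Int)) :
    runA g f ps (l1 ++ l2) = runA g f (runA g f ps l1) l2 := List.foldl_append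

-- fuel-independent "still to visit" measures over an item list (g.items below)
def fCnt (l : List (String × List String)) (ps : PySem.Dict String (Int × Int)) : Nat :=
  (l.filter (fun p => !(ps.contains p.1))).length

def fSum (l : List (String × List String)) (ps : PySem.Dict String (Int × Int)) : Nat :=
  ((l.filter (fun p => !(ps.contains p.1))).map (fun p => p.2.length)).sum

lemma free_mono (l : List (String × List String)) (ps ps' : PySem.Dict String (Int × Int))
    (h : ∀ m, ps.contains m = true → ps'.contains m = true) :
    fCnt l ps' ≤ fCnt l ps ∧ fSum l ps' ≤ fSum l ps := by
  induction l with
  | nil => simp [fCnt, fSum]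
  | cons p t ih =>
    rcases ih with ⟨h1, h2⟩
    by_cases hc : ps.contains p.1 = true
    · have hc' := h _ hc
      simp [fCnt, fSum, List.filter, hc, hc'] at *
      omega
    · simp only [Bool.not_eq_true] at hc
      by_cases hc' : ps'.contains p.1 = true <;>
        simp [fCnt, fSum, List.filter, hc, hc'] at * <;> omega

lemma free_insert_nonkey (l : List (String × List String)) (ps : PySem.Dict String (Int × Int))
    (n : String) (v : Int × Int) (h : ∀ p ∈ l, p.1 ≠ n) :
    fCnt l (ps.insert n v) = fCnt l ps ∧ fSum l (ps.insert n v) = fSum l ps := by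
  induction l with
  | nil => simp [fCnt, fSum]
  | cons p t ih =>
    have hp : p.1 ≠ n := h p (by simp)
    have ht := ih (fun q hq => h q (by simp [hq]))
    have hco : (ps.insert n v).contains p.1 = ps.contains p.1 := by
      rw [PySem.Dict.contains_insert]
      simp [hp]
    rcases ht with ⟨h1, h2⟩
    by_cases hc : ps.contains p.1 = true <;>
      simp [fCnt, fSum, List.filter, hc, hco] at * <;> omega

lemma free_insert_key (l : List (String × List String)) (ps : PySem.Dict String (Int × Int))
    (n : String) (v : Int × Int) (ds : List String)
    (hmem : (n, ds) ∈ l) (hnd : (l.map Prod.fst).Nodup) (hfresh : ps.contains n = false) :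
    fCnt l (ps.insert n v) + 1 ≤ fCnt l ps ∧ fSum l (ps.insert n v) + ds.length ≤ fSum l ps := by
  induction l with
  | nil => simp at hmem
  | cons p t ih =>
    simp only [List.map_cons, List.nodup_cons] at hnd
    rcases hnd with ⟨hnmem, hndt⟩
    rcases List.mem_cons.mp hmem with hph | hpt
    · -- head is the entry with key n
      subst hph
      have hne : ∀ q ∈ t, q.1 ≠ n := by
        intro q hq hqe
        apply hnmem
        have h' : q.1 ∈ t.map Prod.fst := List.mem_map_of_mem hq
        rwa [hqe] at h'
      have := free_insert_nonkey t ps n v hne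
      rcases this with ⟨h1, h2⟩
      have hcn : (ps.insert n v).contains n = true := PySem.Dict.contains_insert_self _ _ _
      simp [fCnt, fSum, List.filter, hfresh, hcn] at *
      omega
    · have hnin : n ∈ t.map Prod.fst := by
        have h' : Prod.fst (n, ds) ∈ t.map Prod.fst := List.mem_map_of_mem hpt
        simpa using h'
      have hp : p.1 ≠ n := by
        intro hpe
        apply hnmem
        rwa [hpe]
      have ht := ih hpt hndt
      have hco : (ps.insert n v).contains p.1 = ps.contains p.1 := by
        rw [PySem.Dict.contains_insert]; simp [hp]
      rcases ht with ⟨h1, h2⟩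
      by_cases hc : ps.contains p.1 = true <;>
        simp [fCnt, fSum, List.filter, hc, hco] at * <;> omega

-- visited nodes stay visited
lemma assignA_contains_mono (g : PySem.Dict String (List String)) :
    ∀ f ps n x y m, ps.contains m = true → (assignA g f ps n x y).contains m = true := by
  intro f
  induction f with
  | zero => intro ps n x y m hm; simpa [assignA] using hm
  | succ f ih =>
    intro ps n x y m hm
    rw [assignA_succ]
    split
    · exact hm
    · have hrun : ∀ l q, q.contains m = true → (runA g f q l).contains m = true := by
        intro l
        induction l with
        | nil => intro q hq; simpa [runA_nil] using hq
        | cons it t iht =>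
          intro q hq
          rw [runA_cons]
          exact iht _ (ih _ _ _ _ _ hq)
      refine hrun _ _ ?_
      rw [PySem.Dict.contains_insert]
      simp [hm]

lemma runA_contains_mono (g : PySem.Dict String (List String)) (f : Nat)
    (l : List (String × Int × Int)) (ps : PySem.Dict String (Int × Int)) (m : String)
    (hm : ps.contains m = true) : (runA g f ps l).contains m = true := by
  induction l generalizing ps with
  | nil => simpa [runA_nil] using hm
  | cons it t iht =>
    rw [runA_cons]
    exact iht _ (assignA_contains_mono g f ps it.1 it.2.1 it.2.2 m hm)

lemma fCnt_assignA_le (g : PySem.Dict String (List String)) (l : List (String × List String))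
    (f : Nat) (ps : PySem.Dict String (Int × Int)) (n : String) (x y : Int) :
    fCnt l (assignA g f ps n x y) ≤ fCnt l ps :=
  (free_mono l ps _ (fun m hm => assignA_contains_mono g f ps n x y m hm)).1

lemma fCnt_runA_le (g : PySem.Dict String (List String)) (l : List (String × List String))
    (f : Nat) (ps : PySem.Dict String (Int × Int)) (st : List (String × Int × Int)) :
    fCnt l (runA g f ps st) ≤ fCnt l ps :=
  (free_mono l ps _ (fun m hm => runA_contains_mono g f st ps m hm)).1

lemma itemsOf_length (x y : Int) (deps : List String) : (itemsOf x y deps).length = deps.length := by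
  simp [itemsOf, PySem.List.length_enumerate]

-- enough fuel: the result of assignA does not depend on the exact fuel
lemma assignA_irrel (g : PySem.Dict String (List String)) (hnd : (g.items.map Prod.fst).Nodup) :
    ∀ f f' ps n x y, fCnt g.items ps + 2 ≤ f → fCnt g.items ps + 2 ≤ f' →
      assignA g f ps n x y = assignA g f' ps n x y := by
  intro f
  induction f using Nat.strong_induction_on with
  | _ f IH =>
  intro f' ps n x y h1 h2
  cases f with
  | zero => omega
  | succ fuel =>
  cases f' with
  | zero => omega
  | succ fuel' =>
  rw [assignA_succ, assignA_succ]
  by_cases hc : ps.contains n = true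
  · rw [if_pos hc, if_pos hc]
  · rw [if_neg hc, if_neg hc]
    have hfresh : ps.contains n = false := by revert hc; cases ps.contains n <;> simp
    cases hget : g.get? n with
    | none =>
      simp [itemsOf, PySem.List.enumerate_nil, runA_nil]
    | some ds =>
      simp only [Option.getD_some]
      obtain ⟨hk1, hk2⟩ := free_insert_key g.items ps n (x, y) ds
        (PySem.Dict.mem_items_of_get?_eq_some _ hget) hnd hfresh
      have inner : ∀ (l : List (String × Int × Int)) q,
          fCnt g.items q + 2 ≤ fuel → fCnt g.items q + 2 ≤ fuel' →
          runA g fuel q l = runA g fuel' q l := by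
        intro l
        induction l with
        | nil => intro q _ _; rfl
        | cons it t iht =>
          intro q hq1 hq2
          rw [runA_cons, runA_cons, IH fuel (by omega) fuel' q it.1 it.2.1 it.2.2 hq1 hq2]
          have hle := fCnt_assignA_le g g.items fuel' q it.1 it.2.1 it.2.2
          exact iht _ (by omega) (by omega)
      exact inner _ _ (by omega) (by omega)

lemma runA_irrel (g : PySem.Dict String (List String)) (hnd : (g.items.map Prod.fst).Nodup)
    (l : List (String × Int × Int)) (f f' : Nat) (ps : PySem.Dict String (Int × Int))
    (h1 : fCnt g.items ps + 2 ≤ f) (h2 : fCnt g.items ps + 2 ≤ f') :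
    runA g f ps l = runA g f' ps l := by
  induction l generalizing ps with
  | nil => rfl
  | cons it t iht =>
    rw [runA_cons, runA_cons, assignA_irrel g hnd f f' ps it.1 it.2.1 it.2.2 h1 h2]
    have hle := fCnt_assignA_le g g.items f' ps it.1 it.2.1 it.2.2
    exact iht _ (by omega) (by omega)

-- bridging B's (seen, order) state to A's dict state
lemma contains_mk_eq_set_contains (order : List (String × Int × Int)) (n : String) :
    (PySem.Dict.mk order).contains n = PySem.Set.contains (order.map (·.1)) n := by
  simp only [PySem.Dict.contains, PySem.Set.contains, BEq.comm]
  rw [show (fun (p : String × Int × Int) => n == p.1) = ((fun q => n == q) ∘ (·.1)) from rfl,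
    ← List.any_map, List.any_beq]

lemma insert_mk_fresh (order : List (String × Int × Int)) (n : String) (x y : Int)
    (h : (PySem.Dict.mk order).contains n = false) :
    (PySem.Dict.mk order).insert n (x, y) = PySem.Dict.mk (order ++ [(n, x, y)]) := by
  apply PySem.Dict.ext
  rw [PySem.Dict.items_insert_of_not_contains (h := h)]

lemma set_add_fresh (seen : PySem.Set String) (n : String)
    (h : PySem.Set.contains seen n = false) : PySem.Set.add seen n = seen ++ [n] := by
  rw [PySem.Set.add]
  simp only [PySem.Set.contains] at h
  have hmem : n ∉ seen := by simpa using h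
  simp [hmem]

-- a fresh key appended to the order list keeps the keys distinct
lemma nodup_append_fresh (order : List (String × Int × Int)) (n : String) (x y : Int)
    (hndo : (order.map (·.1)).Nodup) (hnm : n ∉ order.map (·.1)) :
    ((order ++ [(n, x, y)]).map (·.1)).Nodup := by
  rw [List.map_append]
  simp only [List.nodup_append, List.map_cons, List.map_nil]
  refine ⟨hndo, by simp, ?_⟩
  intro a ha he hhe
  have hhe2 : he = n := by simpa using hhe
  subst hhe2
  intro h2; subst h2
  exact hnm ha

lemma not_mem_of_contains_false (order : List (String × Int × Int)) (n : String)
    (h : (PySem.Dict.mk order).contains n = false) : n ∉ order.map (·.1) := by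
  rw [contains_mk_eq_set_contains] at h
  simp only [PySem.Set.contains] at h
  simpa using h

-- the main bridge: A's recursion run on a pending list = B's stack loop, where B's state
-- (seen, order) corresponds to A's dict state Dict.mk order with seen = the keys of order
lemma runA_eq_loopB (g : PySem.Dict String (List String)) (hnd : (g.items.map Prod.fst).Nodup) :
    ∀ fB fA (order : List (String × Int × Int)) stack, (order.map (·.1)).Nodup →
      stack.length + fCnt g.items (PySem.Dict.mk order) + fSum g.items (PySem.Dict.mk order) ≤ fB →
      fCnt g.items (PySem.Dict.mk order) + 2 ≤ fA →
      runA g fA (PySem.Dict.mk order) stack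
        = PySem.Dict.mk (loopB g fB (order.map (·.1)) order stack) := by
  intro fB
  induction fB using Nat.strong_induction_on with
  | _ fB IH =>
  intro fA order stack hndo hB hA
  cases stack with
  | nil => rw [runA_nil, loopB_nil]
  | cons it rest =>
  obtain ⟨n, x, y⟩ := it
  simp only [List.length_cons] at hB
  cases fB with
  | zero => omega
  | succ m =>
  rw [loopB_cons]
  cases fA with
  | zero => omega
  | succ a =>
  rw [runA_cons, assignA_succ]
  dsimp only
  rw [← contains_mk_eq_set_contains]
  by_cases hc : (PySem.Dict.mk order).contains n = true
  · rw [if_pos hc, if_pos hc]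
    exact IH m (by omega) (a + 1) order rest hndo (by omega) hA
  · rw [if_neg hc, if_neg hc]
    have hfresh : (PySem.Dict.mk order).contains n = false := by
      revert hc; cases (PySem.Dict.mk order).contains n <;> simp
    have hmk := insert_mk_fresh order n x y hfresh
    have hseen : PySem.Set.add (order.map (·.1)) n = (order ++ [(n, x, y)]).map (·.1) := by
      rw [set_add_fresh _ _ (by rw [← contains_mk_eq_set_contains]; exact hfresh)]
      simp
    have hndo' : ((order ++ [(n, x, y)]).map (·.1)).Nodup :=
      nodup_append_fresh order n x y hndo (not_mem_of_contains_false order n hfresh)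
    cases hget : g.get? n with
    | none =>
      have hnk : ∀ p ∈ g.items, p.1 ≠ n := by
        intro p hp hpe
        have hnin : n ∉ g.keys := (PySem.Dict.get?_eq_none_iff_not_mem_keys g n).mp hget
        have h' : p.1 ∈ g.items.map Prod.fst := List.mem_map_of_mem hp
        rw [hpe] at h'
        exact hnin h'
      obtain ⟨e1, e2⟩ := free_insert_nonkey g.items (PySem.Dict.mk order) n (x, y) hnk
      rw [hmk] at e1 e2
      simp only [Option.getD_none]
      rw [show itemsOf x y [] = [] from rfl, runA_nil, List.nil_append, hmk, hseen]
      exact IH m (by omega) (a + 1) (order ++ [(n, x, y)]) rest hndo' (by omega) (by omega)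
    | some ds =>
      simp only [Option.getD_some]
      obtain ⟨hk1, hk2⟩ := free_insert_key g.items (PySem.Dict.mk order) n (x, y) ds
        (PySem.Dict.mem_items_of_get?_eq_some _ hget) hnd hfresh
      rw [hmk] at hk1 hk2
      have hXle := fCnt_runA_le g g.items a (PySem.Dict.mk (order ++ [(n, x, y)])) (itemsOf x y ds)
      rw [hmk]
      rw [runA_irrel g hnd rest (a + 1) a (runA g a (PySem.Dict.mk (order ++ [(n, x, y)])) (itemsOf x y ds))
        (by omega) (by omega)]
      rw [← runA_append, hseen]
      have hlen := itemsOf_length x y ds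
      refine IH m (by omega) a (order ++ [(n, x, y)]) (itemsOf x y ds ++ rest) hndo' ?_ (by omega)
      rw [List.length_append]
      omega

-- keys of the final order list are distinct (so B's dict comprehension keeps every entry)
lemma nodup_loopB (g : PySem.Dict String (List String)) :
    ∀ fB (order : List (String × Int × Int)) stack, (order.map (·.1)).Nodup →
      ((loopB g fB (order.map (·.1)) order stack).map (·.1)).Nodup := by
  intro fB
  induction fB with
  | zero => intro order stack h; simpa [loopB] using h
  | succ m ih =>
    intro order stack h
    cases stack with
    | nil => rw [loopB_nil]; exact h
    | cons it rest =>
      obtain ⟨n, x, y⟩ := it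
      rw [loopB_cons]
      by_cases hc : PySem.Set.contains (order.map (·.1)) n = true
      · rw [if_pos hc]; exact ih order rest h
      · rw [if_neg hc]
        have hfresh : (PySem.Dict.mk order).contains n = false := by
          rw [contains_mk_eq_set_contains]; revert hc
          cases PySem.Set.contains (order.map (·.1)) n <;> simp
        have hndo2 := nodup_append_fresh order n x y h (not_mem_of_contains_false order n hfresh)
        have hseen : PySem.Set.add (order.map (·.1)) n = (order ++ [(n, x, y)]).map (·.1) := by
          rw [set_add_fresh _ _ (by rw [← contains_mk_eq_set_contains]; exact hfresh)]
          simp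
        rw [hseen]
        exact ih (order ++ [(n, x, y)]) _ hndo2

-- a dict built from pairs with distinct keys is those pairs verbatim
lemma ofList_eq_mk (l : List (String × Int × Int)) (hnd : (l.map (·.1)).Nodup) :
    PySem.Dict.ofList (l.map (fun t => (t.1, t.2))) = PySem.Dict.mk l := by
  have hmap : l.map (fun t => (t.1, t.2)) = l := by simp
  rw [hmap]
  have h1 : PySem.Dict.ofList l = l.foldl (fun d p => d.insert p.1 p.2) PySem.Dict.empty := rfl
  apply PySem.Dict.ext
  rw [h1]
  have h2 := PySem.Dict.items_foldl_insert_fresh (l := l) (k := Prod.fst) (v := Prod.snd)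
    (d := PySem.Dict.empty) (by intro a _; simp [PySem.Dict.contains_empty]) (by simpa using hnd)
  simpa using h2

-- string-building bridges
lemma join_empty_cons (x : String) (l : List String) :
    PySem.Str.join "" (x :: l) = x ++ PySem.Str.join "" l := by
  simp only [PySem.Str.join, List.map_cons]
  cases l with
  | nil =>
    simp only [List.map_nil]
    rw [PySem.Chars.join_singleton, PySem.Chars.join_nil, String.ofList_toList]
    rw [show String.ofList [] = "" from rfl, String.append_empty]
  | cons y t =>
    simp only [List.map_cons]
    rw [PySem.Chars.join_cons_cons]
    rw [show ("" : String).toList = ([] : List Char) from rfl, List.append_nil,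
      String.ofList_append, String.ofList_toList]

lemma join_empty_append (l1 l2 : List String) :
    PySem.Str.join "" (l1 ++ l2) = PySem.Str.join "" l1 ++ PySem.Str.join "" l2 := by
  induction l1 with
  | nil =>
    rw [List.nil_append, show PySem.Str.join "" [] = "" from rfl]
    rw [String.empty_append]
  | cons x t ih =>
    rw [List.cons_append, join_empty_cons, join_empty_cons, ih, String.append_assoc]

lemma foldl_append_join {α : Type} (l : List α) (f : α → String) (s : String) :
    l.foldl (fun a x => a ++ f x) s = s ++ PySem.Str.join "" (l.map f) := by
  induction l generalizing s with
  | nil => rw [List.foldl_nil, List.map_nil, show PySem.Str.join "" [] = "" from rfl, String.append_empty]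
  | cons x t ih =>
    rw [List.foldl_cons, ih, List.map_cons, join_empty_cons, String.append_assoc]

-- two appended parts per element: B's flatMap list joins to the map of the pairwise appends
lemma join_flatMap_pair {α : Type} (l : List α) (f h : α → String) :
    PySem.Str.join "" (l.flatMap (fun t => [f t, h t]))
      = PySem.Str.join "" (l.map (fun t => f t ++ h t)) := by
  induction l with
  | nil => rfl
  | cons x t ih =>
    rw [List.flatMap_cons, List.map_cons, join_empty_append, join_empty_cons, join_empty_cons,
      join_empty_cons, ih, show PySem.Str.join "" [] = "" from rfl, String.append_empty,
      String.append_assoc]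

lemma inner_fold (positions : PySem.Dict String (Int × Int)) (q : Int × Int) (deps : List String) (s : String) :
    deps.foldl (fun svg dep =>
        match positions.get? dep with
        | some r => svg ++ pvSvgLine q.1 q.2 r.1 r.2
        | none => svg) s
      = s ++ PySem.Str.join "" (deps.filterMap (fun dep => (positions.get? dep).map (fun r => pvSvgLine q.1 q.2 r.1 r.2))) := by
  induction deps generalizing s with
  | nil => rw [List.foldl_nil, List.filterMap_nil, show PySem.Str.join "" [] = "" from rfl, String.append_empty]
  | cons d t ih =>
    rw [List.foldl_cons, List.filterMap_cons]
    cases hd : positions.get? d with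
    | none =>
      simp only [Option.map_none]
      exact ih s
    | some r =>
      simp only [Option.map_some]
      rw [ih, join_empty_cons, String.append_assoc]

-- the edge loop of A equals the joined edge comprehension of B
lemma edge_fold (positions : PySem.Dict String (Int × Int)) (l : List (String × List String)) (s : String) :
    l.foldl (fun svg p =>
        match positions.get? p.1 with
        | some q =>
            p.2.foldl (fun svg dep =>
              match positions.get? dep with
              | some r => svg ++ pvSvgLine q.1 q.2 r.1 r.2
              | none => svg) svg
        | none => svg) s
      = s ++ PySem.Str.join "" (l.flatMap (fun p =>
          match positions.get? p.1 with
          | some q => p.2.filterMap (fun dep => (positions.get? dep).map (fun r => pvSvgLine q.1 q.2 r.1 r.2))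
          | none => [])) := by
  induction l generalizing s with
  | nil => rw [List.foldl_nil, List.flatMap_nil, show PySem.Str.join "" [] = "" from rfl, String.append_empty]
  | cons p t ih =>
    rw [List.foldl_cons, List.flatMap_cons]
    cases hq : positions.get? p.1 with
    | none =>
      simp only []
      rw [ih, List.nil_append]
    | some q =>
      simp only []
      rw [inner_fold, ih, join_empty_append, String.append_assoc]

-- ===== VERDICT (by name: the statement is the Claim_ definition above) =====
theorem generate_svg_tree_spec : Claim_equal_generate_svg_tree := by
  unfold Claim_equal_generate_svg_tree Spec_generate_svg_tree
  intro graph root _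
  simp only [generate_svg_tree, generate_svg_tree_alt]
  have hnd : (((PySem.Dict.ofList graph : PySem.Dict String (List String)).items.map Prod.fst)).Nodup :=
    PySem.Dict.nodup_keys_ofList graph
  have hc0 : fCnt (PySem.Dict.ofList graph : PySem.Dict String (List String)).items (PySem.Dict.mk [])
      = (PySem.Dict.ofList graph : PySem.Dict String (List String)).size := by
    simp [fCnt, PySem.Dict.contains, PySem.Dict.size]
  have hs0 : fSum (PySem.Dict.ofList graph : PySem.Dict String (List String)).items (PySem.Dict.mk [])
      = (((PySem.Dict.ofList graph : PySem.Dict String (List String)).values).map List.length).sum := by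
    simp [fSum, PySem.Dict.contains, PySem.Dict.values, List.map_map]
    rfl
  -- positions = Dict.mk orderFinal
  have hpos : assignA (PySem.Dict.ofList graph) ((PySem.Dict.ofList graph : PySem.Dict String (List String)).size + 2) PySem.Dict.empty root 400 50
      = PySem.Dict.mk (loopB (PySem.Dict.ofList graph)
          (1 + (PySem.Dict.ofList graph : PySem.Dict String (List String)).size + (((PySem.Dict.ofList graph : PySem.Dict String (List String)).values).map List.length).sum)
          PySem.Set.empty [] [(root, 400, 50)]) := by
    have h1 : assignA (PySem.Dict.ofList graph) ((PySem.Dict.ofList graph : PySem.Dict String (List String)).size + 2) PySem.Dict.empty root 400 50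
        = runA (PySem.Dict.ofList graph) ((PySem.Dict.ofList graph : PySem.Dict String (List String)).size + 2) (PySem.Dict.mk []) [(root, 400, 50)] := rfl
    rw [h1]
    exact runA_eq_loopB (PySem.Dict.ofList graph) hnd _ _ [] _ (by simp)
      (by rw [hc0, hs0]; simp only [List.length_cons, List.length_nil]; omega) (by rw [hc0])
  rw [hpos]
  -- B's lookup dict is A's positions dict
  have hndO : ((loopB (PySem.Dict.ofList graph)
      (1 + (PySem.Dict.ofList graph : PySem.Dict String (List String)).size + (((PySem.Dict.ofList graph : PySem.Dict String (List String)).values).map List.length).sum)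
      PySem.Set.empty [] [(root, 400, 50)]).map (·.1)).Nodup :=
    nodup_loopB (PySem.Dict.ofList graph) _ [] [(root, 400, 50)] (by simp)
  rw [ofList_eq_mk _ hndO]
  -- edges: A's nested fold = B's joined flat list, after the tag lemmas
  rw [edge_fold]
  simp only [pvTag_line, pvTag_rect, pvTagBody_text]
  -- nodes: A's fold over items = B's joined flatMap over the order list
  have hnodes : ∀ (s : String) (l : List (String × (Int × Int))),
      l.foldl (fun svg p => (svg ++ pvSvgRect p.2.1 p.2.2) ++ pvSvgText p.1 p.2.1 p.2.2) s
        = s ++ PySem.Str.join "" (l.map (fun p => pvSvgRect p.2.1 p.2.2 ++ pvSvgText p.1 p.2.1 p.2.2)) := by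
    intro s l
    rw [show (fun (svg : String) (p : String × (Int × Int)) => (svg ++ pvSvgRect p.2.1 p.2.2) ++ pvSvgText p.1 p.2.1 p.2.2)
        = (fun (svg : String) (p : String × (Int × Int)) => svg ++ (pvSvgRect p.2.1 p.2.2 ++ pvSvgText p.1 p.2.1 p.2.2)) from by
      funext svg p; rw [String.append_assoc]]
    exact foldl_append_join l _ s
  rw [hnodes]
  -- assemble B's single join into header ++ edges ++ nodes ++ tail
  rw [join_empty_append, join_empty_append, join_empty_append, join_empty_cons, join_empty_cons,
    show PySem.Str.join "" ([] : List String) = "" from rfl, String.append_empty,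
    String.append_empty,
    join_flatMap_pair _ (fun (t : String × Int × Int) => pvSvgRect t.2.1 t.2.2)
      (fun t => pvSvgText t.1 t.2.1 t.2.2), pvSvgHeader]
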